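-- pv_equiv track=rewrite | github.com/dmccreary/clocks-and-watches | src/kits/large-oled-w/27-ntptime-timezone-test.py | is_daylight_saving_time
-- ===== SOURCE A (Python) =====
-- def day_of_week(year, month, day):
--     """Calculate day of week (0=Monday, 6=Sunday) using Zeller's congruence"""
--     if month < 3:
--         month += 12
--         year -= 1
--
--     k = year % 100
--     j = year // 100
--
--     h = (day + ((13 * (month + 1)) // 5) + k + (k // 4) + (j // 4) - 2 * j) % 7
--
--     # Convert to Python's format (0=Monday, 6=Sunday)
--     return (h + 5) % 7
--
-- def is_daylight_saving_time(year, month, day):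
--     """Check if given date is during daylight saving time in US"""
--     # DST starts second Sunday in March at 2:00 AM
--     # DST ends first Sunday in November at 2:00 AM
--
--     if month < 3 or month > 11:
--         return False
--     if month > 3 and month < 11:
--         return True
--
--     if month == 3:
--         # Find second Sunday in March
--         # Start from March 8th (earliest possible second Sunday)
--         for d in range(8, 15):
--             if day_of_week(year, month, d) == 6:  # Sunday
--                 return day >= d
--
--     if month == 11:
--         # Find first Sunday in November
--         # Start from November 1st
--         for d in range(1, 8):
--             if day_of_week(year, month, d) == 6:  # Sunday
--                 return day < d
--
--     return False
-- ===== SOURCE B (Python) =====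
-- def day_of_week(year, month, day):
--     """Calculate day of week (0=Monday, 6=Sunday) using Zeller's congruence"""
--     if month < 3:
--         month += 12
--         year -= 1
--     k = year % 100
--     j = year // 100
--     h = (day + ((13 * (month + 1)) // 5) + k + (k // 4) + (j // 4) - 2 * j) % 7
--     return (h + 5) % 7
--
-- def is_daylight_saving_time(year, month, day):
--     """Check if given date is during daylight saving time in US"""
--     if month < 3 or month > 11:
--         return False
--     if month > 3 and month < 11:
--         return True
--     if month == 3:
--         # second Sunday in March, by closed-form modular arithmetic
--         first_sunday = 1 + (6 - day_of_week(year, 3, 1)) % 7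
--         return day >= first_sunday + 7
--     # month == 11: first Sunday in November
--     first_sunday = 1 + (6 - day_of_week(year, 11, 1)) % 7
--     return day < first_sunday
-- ===== Notes on version B (the rewrite author's own statement) =====
-- stated objective: simpler
-- what changed: Both 7-iteration search loops for the boundary Sunday are replaced by a closed-form modular computation (1 + (6 - day_of_week(year, month, 1)) % 7) of the first Sunday of the month.
import Mathlib
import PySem

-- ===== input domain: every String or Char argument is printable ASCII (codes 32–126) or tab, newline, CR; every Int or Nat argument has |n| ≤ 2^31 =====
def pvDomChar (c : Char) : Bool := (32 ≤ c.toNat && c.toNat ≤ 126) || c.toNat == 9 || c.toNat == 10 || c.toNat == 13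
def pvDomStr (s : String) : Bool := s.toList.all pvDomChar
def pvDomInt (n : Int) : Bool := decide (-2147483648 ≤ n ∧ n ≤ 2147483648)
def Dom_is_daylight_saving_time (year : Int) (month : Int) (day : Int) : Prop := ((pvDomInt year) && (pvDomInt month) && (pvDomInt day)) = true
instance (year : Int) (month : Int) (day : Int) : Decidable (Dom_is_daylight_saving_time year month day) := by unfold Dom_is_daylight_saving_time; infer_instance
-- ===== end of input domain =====

-- B replaces A's two 7-step search loops for the boundary Sunday by closed-form
-- modular arithmetic from day_of_week(year, month, 1) (objective: simpler).

-- ===== PORT A =====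
-- shared module helper (used verbatim by both Pythons)
def day_of_week (year : Int) (month : Int) (day : Int) : Int :=
  let p := if month < 3 then (month + 12, year - 1) else (month, year)
  let month := p.1
  let year := p.2
  let k := PySem.Int.mod year 100
  let j := PySem.Int.floordiv year 100
  let h := PySem.Int.mod
    (day + PySem.Int.floordiv (13 * (month + 1)) 5 + k + PySem.Int.floordiv k 4
      + PySem.Int.floordiv j 4 - 2 * j) 7
  PySem.Int.mod (h + 5) 7

-- the 'for d in range(8, 15)' loop of the March branch (early return as Option)
def marchLoop (year : Int) (month : Int) (day : Int) : List Int → Option Bool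
  | [] => none
  | d :: ds =>
    if day_of_week year month d = 6 then some (decide (day ≥ d))
    else marchLoop year month day ds

-- the 'for d in range(1, 8)' loop of the November branch
def novLoop (year : Int) (month : Int) (day : Int) : List Int → Option Bool
  | [] => none
  | d :: ds =>
    if day_of_week year month d = 6 then some (decide (day < d))
    else novLoop year month day ds

def is_daylight_saving_time (year : Int) (month : Int) (day : Int) : Bool :=
  if month < 3 ∨ month > 11 then false
  else if month > 3 ∧ month < 11 then true
  else
    match (if month = 3 then marchLoop year month day (PySem.List.pyRange 8 15 1) else none) with
    | some b => b
    | none =>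
      match (if month = 11 then novLoop year month day (PySem.List.pyRange 1 8 1) else none) with
      | some b => b
      | none => false

-- ===== PORT B =====
def is_daylight_saving_time_alt (year : Int) (month : Int) (day : Int) : Bool :=
  if month < 3 ∨ month > 11 then false
  else if month > 3 ∧ month < 11 then true
  else if month = 3 then
    let first_sunday := 1 + PySem.Int.mod (6 - day_of_week year 3 1) 7
    decide (day ≥ first_sunday + 7)
  else
    let first_sunday := 1 + PySem.Int.mod (6 - day_of_week year 11 1) 7
    decide (day < first_sunday)

-- ===== PRECONDITION & SPEC =====
def Spec_is_daylight_saving_time (year : Int) (month : Int) (day : Int) (out : Bool) : Prop := out = is_daylight_saving_time_alt year month day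
instance (year : Int) (month : Int) (day : Int) (out : Bool) : Decidable (Spec_is_daylight_saving_time year month day out) := by unfold Spec_is_daylight_saving_time; infer_instance

-- ===== CLAIM (what is proved, stated in full; the proofs are below) =====
def Claim_equal_is_daylight_saving_time : Prop := ∀ (year : Int) (month : Int) (day : Int), Dom_is_daylight_saving_time year month day → Spec_is_daylight_saving_time year month day (is_daylight_saving_time year month day)

-- ===== LEMMAS AND PROOFS =====

-- day_of_week is linear in the day, modulo 7, for a month ≥ 3
theorem dow_shift (year month d : Int) (hm : ¬ month < 3) :
    day_of_week year month d = (day_of_week year month 1 + (d - 1)) % 7 := by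
  simp only [day_of_week, if_neg hm,
    PySem.Int.mod_eq_emod_of_pos (by norm_num : (0:Int) < 7),
    PySem.Int.mod_eq_emod_of_pos (by norm_num : (0:Int) < 100),
    PySem.Int.floordiv_eq_ediv_of_pos (by norm_num : (0:Int) < 5),
    PySem.Int.floordiv_eq_ediv_of_pos (by norm_num : (0:Int) < 100),
    PySem.Int.floordiv_eq_ediv_of_pos (by norm_num : (0:Int) < 4)]
  omega

theorem dow_bounds (year month d : Int) :
    0 ≤ day_of_week year month d ∧ day_of_week year month d < 7 := by
  unfold day_of_week
  constructor
  · exact PySem.Int.mod_nonneg _ (by norm_num)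
  · exact PySem.Int.mod_lt _ (by norm_num)

-- ===== VERDICT (by name: the statement is the Claim_ definition above) =====
theorem is_daylight_saving_time_spec : Claim_equal_is_daylight_saving_time := by
  intro year month day _
  unfold Spec_is_daylight_saving_time is_daylight_saving_time is_daylight_saving_time_alt
  by_cases h1 : month < 3 ∨ month > 11
  · simp [h1]
  · by_cases h2 : month > 3 ∧ month < 11
    · simp [h1, h2]
    · have hm : month = 3 ∨ month = 11 := by omega
      have hr8 : PySem.List.pyRange 8 15 1 = [8, 9, 10, 11, 12, 13, 14] := by decide
      have hr1 : PySem.List.pyRange 1 8 1 = [1, 2, 3, 4, 5, 6, 7] := by decide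
      rcases hm with hm | hm
      · subst hm
        rw [PySem.Int.mod_eq_emod_of_pos (by norm_num : (0:Int) < 7)]
        set w := day_of_week year 3 1 with hw
        have hb1 : 0 ≤ w := by rw [hw]; exact (dow_bounds year 3 1).1
        have hb2 : w < 7 := by rw [hw]; exact (dow_bounds year 3 1).2
        have hs : ∀ d : Int, day_of_week year 3 d = (w + (d - 1)) % 7 := by
          intro d; rw [hw]; exact dow_shift year 3 d (by norm_num)
        simp only [hr8, marchLoop, hs]
        interval_cases w <;> norm_num
      · subst hm
        rw [PySem.Int.mod_eq_emod_of_pos (by norm_num : (0:Int) < 7)]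
        set w := day_of_week year 11 1 with hw
        have hb1 : 0 ≤ w := by rw [hw]; exact (dow_bounds year 11 1).1
        have hb2 : w < 7 := by rw [hw]; exact (dow_bounds year 11 1).2
        have hs : ∀ d : Int, day_of_week year 11 d = (w + (d - 1)) % 7 := by
          intro d; rw [hw]; exact dow_shift year 11 d (by norm_num)
        simp only [hr1, novLoop, hs]
        interval_cases w <;> norm_num
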